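-- pv_equiv track=rewrite | github.com/Marciland/advent-of-code | day13.py | reflects
-- ===== SOURCE A (Python) =====
-- def reflects(pattern, left, right):
--     '''
--     if leaving vision -> true
--     if not reflecting false
--     '''
--     if left < 0:
--         return True
--     if right > len(pattern)-1:
--         return True
--     if pattern[left] == pattern[right]:
--         return reflects(pattern, left-1, right+1)
--     return False
-- ===== SOURCE B (Python) =====
-- def reflects(pattern, left, right):
--     n = len(pattern)
--     while left >= 0 and right < n:
--         if pattern[left] != pattern[right]:
--             return False
--         left -= 1
--         right += 1
--     return True
-- ===== Notes on version B (the rewrite author's own statement) =====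
-- stated objective: idiomatic
-- what changed: Replaced the recursive self-call with an explicit while loop that expands outward, mutating left/right and returning False on the first mismatch.
-- outside the precondition, e.g. on reflects(['a'], 3, 0): A raises IndexError, B raises IndexError; on reflects([], 0, -1): A raises IndexError, B raises IndexError
import Mathlib
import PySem

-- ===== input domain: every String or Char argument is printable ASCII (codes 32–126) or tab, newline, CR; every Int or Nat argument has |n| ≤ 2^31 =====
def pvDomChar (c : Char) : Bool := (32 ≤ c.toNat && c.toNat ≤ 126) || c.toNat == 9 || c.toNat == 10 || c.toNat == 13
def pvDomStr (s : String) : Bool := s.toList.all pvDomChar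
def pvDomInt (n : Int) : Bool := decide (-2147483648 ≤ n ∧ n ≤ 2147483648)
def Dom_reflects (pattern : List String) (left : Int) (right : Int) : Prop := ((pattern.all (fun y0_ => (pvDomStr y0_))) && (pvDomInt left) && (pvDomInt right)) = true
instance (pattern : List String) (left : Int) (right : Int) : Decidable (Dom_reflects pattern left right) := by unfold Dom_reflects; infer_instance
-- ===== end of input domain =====

-- B replaces A's recursion by an explicit outward-expanding while loop (same values; objective: idiomatic).
-- Pre_ excludes inputs where Python A raises IndexError (left beyond the end, or right below -len).


-- ===== PORT A =====
-- literal transliteration of A's recursion; pyGetD is used under Pre_ (which guarantees the indexing is in range)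
def reflects (pattern : List String) (left : Int) (right : Int) : Bool :=
  if left < 0 then true
  else if right > PySem.List.len pattern - 1 then true
  else if PySem.List.pyGetD pattern left "" == PySem.List.pyGetD pattern right "" then
    reflects pattern (left - 1) (right + 1)
  else false
termination_by (left + 1).toNat
decreasing_by omega

-- ===== PORT B =====
-- the while loop of Source B: condition at the top, early return False on mismatch, True when the loop exits
def reflectsLoop (pattern : List String) (n : Int) (left : Int) (right : Int) : Bool :=
  if 0 ≤ left ∧ right < n then
    if PySem.List.pyGetD pattern left "" != PySem.List.pyGetD pattern right "" then false
    else reflectsLoop pattern n (left - 1) (right + 1)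
  else true
termination_by (left + 1).toNat
decreasing_by omega

def reflects_alt (pattern : List String) (left : Int) (right : Int) : Bool :=
  reflectsLoop pattern (PySem.List.len pattern) left right

-- ===== PRECONDITION & SPEC =====
-- Pre_ excludes exactly the inputs where A (and B alike) raises IndexError on the very first
-- comparison: both bound tests passed but left ≥ len(pattern) or right < -len(pattern).
def Pre_reflects (pattern : List String) (left : Int) (right : Int) : Prop :=
  (0 ≤ left ∧ right ≤ (pattern.length : Int) - 1) →
    (left < (pattern.length : Int) ∧ -(pattern.length : Int) ≤ right)
instance (pattern : List String) (left : Int) (right : Int) : Decidable (Pre_reflects pattern left right) := by unfold Pre_reflects; infer_instance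

def pvWitness_reflects : List String × Int × Int := (["#.#", "..#", "..#", "#.#"], 1, 2)

def Spec_reflects (pattern : List String) (left : Int) (right : Int) (out : Bool) : Prop := out = reflects_alt pattern left right
instance (pattern : List String) (left : Int) (right : Int) (out : Bool) : Decidable (Spec_reflects pattern left right out) := by unfold Spec_reflects; infer_instance

-- ===== CLAIM (what is proved, stated in full; the proofs are below) =====
def Claim_equal_reflects : Prop := ∀ (pattern : List String) (left : Int) (right : Int), Dom_reflects pattern left right → Pre_reflects pattern left right → Spec_reflects pattern left right (reflects pattern left right)

-- ===== LEMMAS AND PROOFS =====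

lemma reflects_eq_loop (k : Nat) : ∀ (pattern : List String) (left right : Int),
    (left + 1).toNat ≤ k → Pre_reflects pattern left right →
    reflects pattern left right = reflectsLoop pattern (PySem.List.len pattern) left right := by
  induction k with
  | zero =>
    intro pattern left right hk _
    have hl : left < 0 := by omega
    rw [reflects, reflectsLoop]
    simp [PySem.List.len_eq, hl, show ¬ (0 ≤ left ∧ right < (pattern.length : Int)) by omega]
  | succ k ih =>
    intro pattern left right hk hpre
    rw [reflects, reflectsLoop]
    simp only [PySem.List.len_eq]
    by_cases hl : left < 0
    · rw [if_pos hl, if_neg (show ¬ (0 ≤ left ∧ right < (pattern.length : Int)) by omega)]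
    · rw [if_neg hl]
      by_cases hr : right > (pattern.length : Int) - 1
      · rw [if_pos hr, if_neg (show ¬ (0 ≤ left ∧ right < (pattern.length : Int)) by omega)]
      · rw [if_neg hr, if_pos (show 0 ≤ left ∧ right < (pattern.length : Int) by omega)]
        have hrec : Pre_reflects pattern (left - 1) (right + 1) := by
          obtain ⟨hlt, hge⟩ := hpre ⟨by omega, by omega⟩
          intro h; exact ⟨by omega, by omega⟩
        by_cases heq : (PySem.List.pyGetD pattern left "" == PySem.List.pyGetD pattern right "") = true
        · rw [if_pos heq, if_neg (show ¬ ((PySem.List.pyGetD pattern left "" != PySem.List.pyGetD pattern right "") = true) by simp [bne]; simpa using heq)]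
          simpa [PySem.List.len_eq] using ih pattern (left - 1) (right + 1) (by omega) hrec
        · rw [if_neg heq, if_pos (show (PySem.List.pyGetD pattern left "" != PySem.List.pyGetD pattern right "") = true by simp [bne]; simpa using heq)]

-- ===== VERDICT (by name: the statement is the Claim_ definition above) =====
theorem reflects_spec : Claim_equal_reflects := by
  intro pattern left right _ hpre
  unfold Spec_reflects reflects_alt
  exact reflects_eq_loop (left + 1).toNat pattern left right le_rfl hpre
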